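-- pv_equiv track=rewrite | github.com/sanyam-ezlearn/EZLEARN_WEEK1-2 | pq1.py | count_helpful_integers
-- ===== SOURCE A (Python) =====
-- def count_helpful_integers(s):
--     MOD = 10**9 + 7
--     N = len(s)
--     dp = [[0] * 143 for _ in range(N + 1)]
--     dp[0][0] = 1
--
--     for i in range(N):
--         for remainder in range(143):
--             if s[i] == '?':
--                 for digit in range(10):
--                     new_remainder = (remainder * 10 + digit) % 143
--                     dp[i + 1][new_remainder] += dp[i][remainder]
--                     dp[i + 1][new_remainder] %= MOD
--             else:
--                 digit = int(s[i])
--                 new_remainder = (remainder * 10 + digit) % 143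
--                 dp[i + 1][new_remainder] += dp[i][remainder]
--                 dp[i + 1][new_remainder] %= MOD
--
--     target_remainder = 7  # remainder when divided by both 13 and 11
--     return dp[N][target_remainder] % MOD
-- ===== SOURCE B (Python) =====
-- def count_helpful_integers(s):
--     MOD = 10**9 + 7
--     # ways[r] = number of ways to fill the already-processed suffix so that a
--     # prefix remainder of r leads to a total value = 7 (mod 143)
--     ways = [1 if r == 7 else 0 for r in range(143)]
--     for ch in reversed(s):
--         if ch == '?':
--             ways = [sum(ways[(10 * r + d) % 143] for d in range(10)) % MOD
--                     for r in range(143)]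
--         else:
--             d = int(ch)
--             ways = [ways[(10 * r + d) % 143] for r in range(143)]
--     return ways[0]
-- ===== Notes on version B (the rewrite author's own statement) =====
-- stated objective: simpler
-- what changed: Replaces the forward (N+1)x143 prefix-remainder table with a single rolling 143-vector of suffix completion counts built right-to-left: a concrete digit becomes a pure relabelling ways[r] -> ways[(10r+d)%143] with no additions, only wildcard positions sum 10 entries, and the answer is read at index 0 instead of 7.
import Mathlib
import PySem

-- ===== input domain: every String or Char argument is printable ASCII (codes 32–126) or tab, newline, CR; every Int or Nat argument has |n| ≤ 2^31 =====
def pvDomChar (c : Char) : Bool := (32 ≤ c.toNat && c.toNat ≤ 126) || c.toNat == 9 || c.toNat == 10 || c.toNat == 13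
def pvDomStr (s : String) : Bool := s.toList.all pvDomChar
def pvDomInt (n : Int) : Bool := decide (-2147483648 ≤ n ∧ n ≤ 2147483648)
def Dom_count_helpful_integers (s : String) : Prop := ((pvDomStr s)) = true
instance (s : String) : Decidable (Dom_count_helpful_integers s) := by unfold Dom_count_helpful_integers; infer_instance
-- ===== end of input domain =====

-- B replaces A's forward (N+1)*143 prefix-remainder table with one rolling 143-vector of
-- suffix completion counts built right-to-left (simpler: one array, and a concrete digit
-- is a pure relabelling with no additions); same return value on every admitted string.

-- ===== PORT A =====

-- int(c) for a one-character string (exact: PySem.Int.ofChars? is int(); the .getD 0 is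
-- never reached under Pre_, which excludes the chars on which int() raises ValueError)
def pvDigit (c : Char) : Int := (PySem.Int.ofChars? [c]).getD 0

-- dp[i][j] = (dp[i][j] + v) % MOD   (the combined effect of Python's  +=  then  %=)
def updA (t : List (List Int)) (i j : Nat) (v : Int) : List (List Int) :=
  t.set i ((t.getD i []).set j (((t.getD i []).getD j 0 + v) % 1000000007))

-- body of A's  for i in range(N)  loop (indices (remainder*10+digit) % 143 are computed
-- in Nat resp. via Int-emod + .toNat; both are exact: the operands are nonnegative and
-- the emod by the positive modulus 143 lies in [0, 143), so .toNat does not clamp)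
def stepA (cs : List Char) (dp : List (List Int)) (i : Nat) : List (List Int) :=
  (List.range 143).foldl (fun dp r =>
    if cs.getD i ' ' = '?' then
      (List.range 10).foldl (fun dp d =>
        updA dp (i+1) ((r * 10 + d) % 143) ((dp.getD i []).getD r 0)) dp
    else
      updA dp (i+1) (((r : Int) * 10 + pvDigit (cs.getD i ' ')) % 143).toNat
        ((dp.getD i []).getD r 0)) dp

def count_helpful_integers (s : String) : Int :=
  let N := s.toList.length
  let dp0 : List (List Int) := List.replicate (N + 1) (List.replicate 143 (0 : Int))
  let dp1 := dp0.set 0 ((dp0.getD 0 []).set 0 1)         -- dp[0][0] = 1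
  let dp := (List.range N).foldl (stepA s.toList) dp1
  (dp.getD N []).getD 7 0 % 1000000007

-- ===== PORT B =====

-- body of B's  for ch in reversed(s)  loop (list comprehensions over range(143);
-- indices (10*r+d) % 143 are in [0, 143), so .getD / .toNat are exact as in port A)
def stepB (ways : List Int) (ch : Char) : List Int :=
  if ch = '?' then
    (List.range 143).map (fun r =>
      ((List.range 10).map (fun d => ways.getD ((10 * r + d) % 143) 0)).sum % 1000000007)
  else
    (List.range 143).map (fun (r : Nat) =>
      ways.getD ((10 * (r : Int) + pvDigit ch) % 143).toNat 0)

def count_helpful_integers_alt (s : String) : Int :=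
  let init : List Int := (List.range 143).map (fun r => if r = 7 then (1 : Int) else 0)
  let ways := s.toList.reverse.foldl stepB init
  ways.getD 0 0

-- ===== PRECONDITION & SPEC =====
-- Pre_ excludes exactly the strings containing a character that is neither a decimal
-- digit nor '?': on those Python A raises ValueError (int() applied to that character).
def Pre_count_helpful_integers (s : String) : Prop :=
  s.toList.all (fun c => c == '?' || c.isDigit) = true
instance (s : String) : Decidable (Pre_count_helpful_integers s) := by
  unfold Pre_count_helpful_integers; infer_instance

def pvWitness_count_helpful_integers : String := "1?3"

def Spec_count_helpful_integers (s : String) (out : Int) : Prop := out = count_helpful_integers_alt s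
instance (s : String) (out : Int) : Decidable (Spec_count_helpful_integers s out) := by unfold Spec_count_helpful_integers; infer_instance

-- ===== CLAIM (what is proved, stated in full; the proofs are below) =====
def Claim_equal_count_helpful_integers : Prop := ∀ (s : String), Dom_count_helpful_integers s → Pre_count_helpful_integers s → Spec_count_helpful_integers s (count_helpful_integers s)

-- ===== LEMMAS AND PROOFS =====

-- the characters Pre_ admits
def pvValid (c : Char) : Prop := c = '?' ∨ c.isDigit

-- the digits Python may place at a position holding the character c
def digitsOf (c : Char) : List Nat := if c = '?' then List.range 10 else [c.toNat - 48]

-- W cs r = the exact number of ways to fill the '?' of cs so that, starting from prefix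
-- remainder r, the remainder of the resulting integer mod 143 is 7
def W : List Char → Nat → Nat
  | [], r => if r = 7 then 1 else 0
  | c :: cs, r => ((digitsOf c).map (fun d => W cs ((r * 10 + d) % 143))).sum

-- list-sum over an initial segment of ℕ (rfl-equal to the Finset.range sum)
def LSum (n : Nat) (f : Nat → Int) : Int := ((List.range n).map f).sum

-- a single Python statement  dst[j] = (dst[j] + v) % MOD
def addCell (dst : List Int) (j : Nat) (v : Int) : List Int :=
  dst.set j ((dst.getD j 0 + v) % 1000000007)

-- A's step on row i, seen as a function of rows i and i+1 only
def rowStep (c : Char) (src dst : List Int) : List Int :=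
  (List.range 143).foldl (fun dst r =>
    if c = '?' then
      (List.range 10).foldl (fun dst d => addCell dst ((r * 10 + d) % 143) (src.getD r 0)) dst
    else
      addCell dst (((r : Int) * 10 + pvDigit c) % 143).toNat (src.getD r 0)) dst

-- all (cell, increment) pairs A's step on one character adds into the next row
def pairsFor (c : Char) (src : List Int) : List (Nat × Int) :=
  (List.range 143).flatMap (fun r =>
    (digitsOf c).map (fun d => ((r * 10 + d) % 143, src.getD r 0)))

-- total increment a pair list adds into cell j
def hits (j : Nat) (P : List (Nat × Int)) : Int :=
  ((P.filter (fun p => p.1 == j)).map Prod.snd).sum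

-- row k of A's table after processing the first k characters
def prefRow (cs : List Char) : List Int :=
  cs.foldl (fun row c => rowStep c row (List.replicate 143 0))
    ((List.replicate 143 (0 : Int)).set 0 1)

-- generic getD/set facts ------------------------------------------------------------

lemma getD_set_self {α : Type} (l : List α) (i : Nat) (x d : α) (h : i < l.length) :
    (l.set i x).getD i d = x := by
  simp [List.getD_eq_getElem?_getD, h]

lemma getD_set_ne {α : Type} (l : List α) (i j : Nat) (x d : α) (h : i ≠ j) :
    (l.set i x).getD j d = l.getD j d := by
  simp [List.getD_eq_getElem?_getD, h]

lemma getD_map_range' (k j : Nat) (f : Nat → Int) (h : j < k) :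
    ((List.range k).map f).getD j 0 = f j := by
  simp [List.getD_eq_getElem?_getD, h]

lemma getD_replicate' {α : Type} (n j : Nat) (x d : α) (h : j < n) :
    (List.replicate n x).getD j d = x := by
  simp [List.getD_eq_getElem?_getD, h]

lemma take_succ_getD (cs : List Char) (k : Nat) (h : k < cs.length) :
    cs.take (k + 1) = cs.take k ++ [cs.getD k ' '] := by
  rw [List.take_add_one]
  simp [List.getElem?_eq_getElem h, List.getD_eq_getElem?_getD]

-- char-level facts ------------------------------------------------------------------

lemma digit_cases (c : Char) (h : c.isDigit) :
    c = '0' ∨ c = '1' ∨ c = '2' ∨ c = '3' ∨ c = '4' ∨ c = '5' ∨ c = '6' ∨ c = '7' ∨ c = '8' ∨ c = '9' := by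
  simp [Char.isDigit] at h
  obtain ⟨h1, h2⟩ := h
  have ec : ∀ k : Char, c.val.toNat = k.val.toNat → c = k :=
    fun k hk => Char.ext (UInt32.toNat_inj.mp hk)
  have a1 := UInt32.le_iff_toNat_le.mp h1
  have a2 := UInt32.le_iff_toNat_le.mp h2
  simp at a1 a2
  have e : c.toNat = c.val.toNat := rfl
  have hv : c.val.toNat = 48 ∨ c.val.toNat = 49 ∨ c.val.toNat = 50 ∨ c.val.toNat = 51 ∨ c.val.toNat = 52 ∨ c.val.toNat = 53 ∨ c.val.toNat = 54 ∨ c.val.toNat = 55 ∨ c.val.toNat = 56 ∨ c.val.toNat = 57 := by omega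
  rcases hv with h|h|h|h|h|h|h|h|h|h
  · exact Or.inl (ec '0' (by simpa using h))
  · exact Or.inr (Or.inl (ec '1' (by simpa using h)))
  · exact Or.inr (Or.inr (Or.inl (ec '2' (by simpa using h))))
  · exact Or.inr (Or.inr (Or.inr (Or.inl (ec '3' (by simpa using h)))))
  · exact Or.inr (Or.inr (Or.inr (Or.inr (Or.inl (ec '4' (by simpa using h))))))
  · exact Or.inr (Or.inr (Or.inr (Or.inr (Or.inr (Or.inl (ec '5' (by simpa using h)))))))
  · exact Or.inr (Or.inr (Or.inr (Or.inr (Or.inr (Or.inr (Or.inl (ec '6' (by simpa using h))))))))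
  · exact Or.inr (Or.inr (Or.inr (Or.inr (Or.inr (Or.inr (Or.inr (Or.inl (ec '7' (by simpa using h)))))))))
  · exact Or.inr (Or.inr (Or.inr (Or.inr (Or.inr (Or.inr (Or.inr (Or.inr (Or.inl (ec '8' (by simpa using h))))))))))
  · exact Or.inr (Or.inr (Or.inr (Or.inr (Or.inr (Or.inr (Or.inr (Or.inr (Or.inr (ec '9' (by simpa using h))))))))))

lemma pvDigit_digit (c : Char) (h : c.isDigit) :
    pvDigit c = ((c.toNat - 48 : Nat) : Int) := by
  rcases digit_cases c h with h|h|h|h|h|h|h|h|h|h <;> subst h <;> decide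

lemma digit_indexA (c : Char) (h : c.isDigit) (r : Nat) :
    ((r : Int) * 10 + pvDigit c) % 143 = (((r * 10 + (c.toNat - 48)) % 143 : Nat) : Int) := by
  rw [pvDigit_digit c h]; push_cast; ring

lemma digit_indexB (c : Char) (h : c.isDigit) (r : Nat) :
    (10 * (r : Int) + pvDigit c) % 143 = (((10 * r + (c.toNat - 48)) % 143 : Nat) : Int) := by
  rw [pvDigit_digit c h]; push_cast; ring

-- modular-sum helpers ---------------------------------------------------------------

lemma list_sum_modeq {α : Type} (l : List α) (f g : α → Int)
    (h : ∀ x ∈ l, Int.ModEq 1000000007 (f x) (g x)) :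
    Int.ModEq 1000000007 ((l.map f).sum) ((l.map g).sum) := by
  induction l with
  | nil => simp [Int.ModEq.refl]
  | cons a l ih =>
    simp only [List.map_cons, List.sum_cons]
    exact Int.ModEq.add (h a (by simp)) (ih (fun x hx => h x (by simp [hx])))

lemma emod_emod_self (a : Int) : a % 1000000007 % 1000000007 = a % 1000000007 :=
  Int.emod_emod_of_dvd a dvd_rfl

-- hits computations -----------------------------------------------------------------

lemma hits_cons (j j0 : Nat) (v : Int) (P : List (Nat × Int)) :
    hits j ((j0, v) :: P) = (if j0 = j then v else 0) + hits j P := by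
  by_cases h : j0 = j <;> simp [hits, h]

lemma hits_append (j : Nat) (P Q : List (Nat × Int)) :
    hits j (P ++ Q) = hits j P + hits j Q := by
  simp [hits, List.filter_append]

lemma hits_flatMap {α : Type} (j : Nat) (l : List α) (f : α → List (Nat × Int)) :
    hits j (l.flatMap f) = (l.map (fun a => hits j (f a))).sum := by
  induction l with
  | nil => simp [hits]
  | cons a l ih => simp [List.flatMap_cons, hits_append, ih]

lemma hits_map_pairs (t : Nat) (ds : List Nat) (k : Nat → Nat) (v : Int) :
    hits t (ds.map (fun d => (k d, v))) = (ds.map (fun d => if k d = t then v else 0)).sum := by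
  induction ds with
  | nil => simp [hits]
  | cons d ds ih => simp only [List.map_cons, hits_cons, List.sum_cons, ih]

-- the accumulation of a pair list into a row, cell by cell --------------------------

lemma addCell_fold (P : List (Nat × Int)) :
    ∀ (dst : List Int) (Y : Nat → Int), dst.length = 143 →
      (∀ j, j < 143 → dst.getD j 0 = Y j % 1000000007) → (∀ p ∈ P, p.1 < 143) →
      (P.foldl (fun dst p => addCell dst p.1 p.2) dst).length = 143 ∧
      ∀ j, j < 143 →
        (P.foldl (fun dst p => addCell dst p.1 p.2) dst).getD j 0
          = (Y j + hits j P) % 1000000007 := by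
  induction P with
  | nil =>
    intro dst Y hlen hY _
    refine ⟨hlen, fun j hj => ?_⟩
    simp only [List.foldl_nil, hits, List.filter_nil, List.map_nil, List.sum_nil, add_zero]
    exact hY j hj
  | cons p P ih =>
    intro dst Y hlen hY hP
    obtain ⟨j0, v⟩ := p
    have hj0 : j0 < 143 := hP (j0, v) (by simp)
    have hlen' : (addCell dst j0 v).length = 143 := by simp [addCell, hlen]
    have hY' : ∀ j, j < 143 →
        (addCell dst j0 v).getD j 0 = (if j = j0 then Y j + v else Y j) % 1000000007 := by
      intro j hj
      by_cases h : j = j0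
      · subst h
        rw [addCell, getD_set_self _ _ _ _ (by omega), hY j hj]
        simp [Int.add_emod]
      · rw [addCell, getD_set_ne _ _ _ _ _ (Ne.symm h), hY j hj]
        simp [h]
    have := ih (addCell dst j0 v) _ hlen' hY' (fun q hq => hP q (by simp [hq]))
    refine ⟨this.1, fun j hj => ?_⟩
    simp only [List.foldl_cons]
    rw [this.2 j hj, hits_cons]
    by_cases h : j = j0
    · subst h; simp; ring_nf
    · have : ¬ j0 = j := fun hh => h hh.symm
      simp [h, this]

lemma pairsFor_lt (c : Char) (src : List Int) : ∀ p ∈ pairsFor c src, p.1 < 143 := by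
  intro p hp
  simp only [pairsFor, List.mem_flatMap, List.mem_map] at hp
  obtain ⟨r, _, d, _, rfl⟩ := hp
  exact Nat.mod_lt _ (by norm_num)

-- rowStep as the accumulation of its pair list --------------------------------------

lemma rowStep_eq_pairs (c : Char) (hc : pvValid c) (src dst : List Int) :
    rowStep c src dst = (pairsFor c src).foldl (fun dst p => addCell dst p.1 p.2) dst := by
  by_cases hq : c = '?'
  · simp [rowStep, pairsFor, hq, digitsOf, List.foldl_flatMap, List.foldl_map]
  · have hd : c.isDigit := hc.resolve_left hq
    simp only [rowStep, pairsFor, hq, if_false, digitsOf, List.foldl_flatMap, List.foldl_map,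
      List.foldl_cons, List.foldl_nil]
    congr 1
    funext dst r
    rw [digit_indexA c hd r, Int.toNat_natCast]

-- the evolving table: a fold that writes only row i+1 --------------------------------

lemma foldl_rowset {α : Type} (i : Nat)
    (F : List (List Int) → α → List (List Int))
    (G : List Int → List Int → α → List Int)
    (hF : ∀ dp a, i + 1 < dp.length → F dp a = dp.set (i+1) (G (dp.getD i []) (dp.getD (i+1) []) a)) :
    ∀ (L : List α) (dp : List (List Int)), i + 1 < dp.length →
      L.foldl F dp = dp.set (i+1) (L.foldl (G (dp.getD i [])) (dp.getD (i+1) [])) := by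
  intro L
  induction L with
  | nil =>
    intro dp h
    simp only [List.foldl_nil]
    rw [List.getD_eq_getElem?_getD, List.getElem?_eq_getElem h]
    exact (List.set_getElem_self h).symm
  | cons a L ih =>
    intro dp h
    rw [List.foldl_cons, hF dp a h, ih _ (by simpa using h),
      getD_set_ne _ _ _ _ _ (by omega), getD_set_self _ _ _ _ h, List.set_set,
      List.foldl_cons]

lemma stepA_eq (cs : List Char) (i : Nat) (dp : List (List Int)) (h : i + 1 < dp.length) :
    stepA cs dp i = dp.set (i+1) (rowStep (cs.getD i ' ') (dp.getD i []) (dp.getD (i+1) [])) := by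
  unfold stepA rowStep
  refine foldl_rowset i _
    (fun src dst r =>
      if cs.getD i ' ' = '?' then
        (List.range 10).foldl (fun dst d => addCell dst ((r * 10 + d) % 143) (src.getD r 0)) dst
      else addCell dst (((r : Int) * 10 + pvDigit (cs.getD i ' ')) % 143).toNat (src.getD r 0))
    ?_ _ dp h
  intro dp' r h'
  by_cases hq : cs.getD i ' ' = '?'
  · simp only [hq, if_true]
    exact foldl_rowset i _
      (fun src dst d => addCell dst ((r * 10 + d) % 143) (src.getD r 0))
      (fun _ _ _ => rfl) _ dp' h'
  · simp only [hq, if_false]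
    rfl

-- A's table, row by row --------------------------------------------------------------

def pvInit (N : Nat) : List (List Int) :=
  (List.replicate (N + 1) (List.replicate 143 (0 : Int))).set 0
    (((List.replicate (N + 1) (List.replicate 143 (0 : Int))).getD 0 []).set 0 1)

lemma A_table (cs : List Char) (k : Nat) (hk : k ≤ cs.length) :
    ((List.range k).foldl (stepA cs) (pvInit cs.length)).length = cs.length + 1 ∧
    ((List.range k).foldl (stepA cs) (pvInit cs.length)).getD k [] = prefRow (cs.take k) ∧
    ∀ m, k < m → m ≤ cs.length →
      ((List.range k).foldl (stepA cs) (pvInit cs.length)).getD m [] = List.replicate 143 0 := by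
  induction k with
  | zero =>
    refine ⟨by simp [pvInit], ?_, ?_⟩
    · rw [List.range_zero, List.foldl_nil, pvInit,
        getD_set_self _ _ _ _ (by simp),
        getD_replicate' _ _ _ _ (by omega)]
      simp [prefRow]
    · intro m hm hm'
      rw [List.range_zero, List.foldl_nil, pvInit,
        getD_set_ne _ _ _ _ _ (by omega),
        getD_replicate' _ _ _ _ (by omega)]
  | succ k ih =>
    have hk' : k ≤ cs.length := by omega
    have hkl : k < cs.length := by omega
    obtain ⟨ihlen, ihrow, ihz⟩ := ih hk'
    rw [List.range_succ, List.foldl_append, List.foldl_cons, List.foldl_nil]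
    set dps := (List.range k).foldl (stepA cs) (pvInit cs.length) with hdps
    have hlen : k + 1 < dps.length := by omega
    rw [stepA_eq cs k dps hlen]
    refine ⟨by simp [ihlen], ?_, ?_⟩
    · rw [getD_set_self _ _ _ _ hlen, ihrow, ihz (k+1) (by omega) (by omega),
        take_succ_getD cs k hkl]
      simp [prefRow, List.foldl_append]
    · intro m hm hm'
      rw [getD_set_ne _ _ _ _ _ (by omega), ihz m (by omega) hm']

-- list-sum / Finset.range-sum bridges ----------------------------------------------

lemma LSum_eq (n : Nat) (f : Nat → Int) : LSum n f = ∑ i ∈ Finset.range n, f i := rfl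

lemma finsetSum_listSum_comm {α : Type} (n : Nat) (l : List α) (g : Nat → α → Int) :
    ∑ t ∈ Finset.range n, (l.map (g t)).sum = (l.map (fun a => ∑ t ∈ Finset.range n, g t a)).sum := by
  induction l with
  | nil => simp
  | cons a l ih => simp [Finset.sum_add_distrib, ih]

lemma hits_pairsFor (c : Char) (src : List Int) (t : Nat) :
    hits t (pairsFor c src)
      = LSum 143 (fun r => ((digitsOf c).map
          (fun d => if (r * 10 + d) % 143 = t then src.getD r 0 else 0)).sum) := by
  rw [pairsFor, hits_flatMap, LSum]
  congr 1
  apply List.map_congr_left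
  intro r _
  rw [hits_map_pairs]

-- the double-sum reindexing behind "push one character through the table"
lemma reindex (c : Char) (cs : List Char) (V : Nat → Int) :
    LSum 143 (fun t =>
      LSum 143 (fun r => ((digitsOf c).map (fun d => if (r*10+d) % 143 = t then V r else 0)).sum)
        * (W cs t : Int))
    = LSum 143 (fun r => V r * (W (c :: cs) r : Int)) := by
  rw [LSum_eq, LSum_eq]
  simp only [LSum_eq]
  calc
    (∑ t ∈ Finset.range 143,
        (∑ r ∈ Finset.range 143, ((digitsOf c).map (fun d => if (r*10+d) % 143 = t then V r else 0)).sum)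
          * (W cs t : Int))
        = ∑ t ∈ Finset.range 143, ∑ r ∈ Finset.range 143,
            ((digitsOf c).map (fun d => if (r*10+d) % 143 = t then V r * (W cs t : Int) else 0)).sum := by
          refine Finset.sum_congr rfl (fun t _ => ?_)
          rw [Finset.sum_mul]
          refine Finset.sum_congr rfl (fun r _ => ?_)
          rw [← List.sum_map_mul_right]
          congr 1
          apply List.map_congr_left
          intro d _
          by_cases h : (r*10+d) % 143 = t <;> simp [h]
    _ = ∑ r ∈ Finset.range 143,
            ((digitsOf c).map (fun d => V r * (W cs ((r*10+d) % 143) : Int))).sum := by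
          rw [Finset.sum_comm]
          refine Finset.sum_congr rfl (fun r _ => ?_)
          rw [finsetSum_listSum_comm]
          congr 1
          apply List.map_congr_left
          intro d _
          rw [Finset.sum_ite_eq]
          simp [Nat.mod_lt]
    _ = ∑ r ∈ Finset.range 143, V r * (W (c :: cs) r : Int) := by
          refine Finset.sum_congr rfl (fun r _ => ?_)
          rw [List.sum_map_mul_left]
          congr 1
          rw [show W (c :: cs) r = ((digitsOf c).map (fun d => W cs ((r * 10 + d) % 143))).sum from rfl,
            Nat.cast_list_sum, List.map_map]
          rfl

-- the invariant connecting A's rows to W ---------------------------------------------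

lemma A_main (cs : List Char) (hv : ∀ c ∈ cs, pvValid c) :
    ∀ (row : List Int) (V : Nat → Int), row.length = 143 →
      (∀ r, r < 143 → row.getD r 0 = V r % 1000000007) →
      (cs.foldl (fun row c => rowStep c row (List.replicate 143 0)) row).getD 7 0
        = LSum 143 (fun r => V r * (W cs r : Int)) % 1000000007 := by
  induction cs with
  | nil =>
    intro row V hlen hV
    rw [List.foldl_nil, hV 7 (by omega)]
    have : LSum 143 (fun r => V r * (W [] r : Int)) = V 7 := by
      rw [LSum_eq]
      rw [Finset.sum_congr rfl (fun r _ => by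
        by_cases h : r = 7 <;> simp [W, h] : ∀ r ∈ Finset.range 143,
          V r * ((W [] r : Nat) : Int) = if r = 7 then V r else 0)]
      simp
    rw [this]
  | cons c cs ih =>
    intro row V hlen hV
    rw [List.foldl_cons]
    have hvc : pvValid c := hv c (by simp)
    have hvs : ∀ x ∈ cs, pvValid x := fun x hx => hv x (by simp [hx])
    have hz : ∀ j, j < 143 → (List.replicate 143 (0:Int)).getD j 0 = (0:Int) % 1000000007 := by
      intro j hj; rw [getD_replicate' _ _ _ _ hj]; simp
    have hacc := addCell_fold (pairsFor c row) (List.replicate 143 0) (fun _ => 0)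
      (by simp) hz (pairsFor_lt c row)
    rw [rowStep_eq_pairs c hvc row]
    rw [ih hvs _ (fun t => hits t (pairsFor c row)) hacc.1
      (fun t ht => by rw [hacc.2 t ht, zero_add])]
    have key : Int.ModEq 1000000007
        (LSum 143 (fun t => hits t (pairsFor c row) * (W cs t : Int)))
        (LSum 143 (fun r => V r * (W (c :: cs) r : Int))) := by
      have step1 : Int.ModEq 1000000007
          (LSum 143 (fun t => hits t (pairsFor c row) * (W cs t : Int)))
          (LSum 143 (fun t =>
            LSum 143 (fun r => ((digitsOf c).map (fun d => if (r*10+d) % 143 = t then V r else 0)).sum)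
              * (W cs t : Int))) := by
        apply list_sum_modeq
        intro t _
        apply Int.ModEq.mul_right
        rw [hits_pairsFor]
        apply list_sum_modeq
        intro r hr
        apply list_sum_modeq
        intro d _
        by_cases h : (r*10+d) % 143 = t
        · simp only [h, if_true]
          rw [hV r (List.mem_range.mp hr)]
          exact Int.mod_modEq (V r) 1000000007
        · simp [h]
      exact step1.trans (by rw [reindex])
    exact key

-- B's rolling vector -----------------------------------------------------------------

lemma B_inv (cs : List Char) (hv : ∀ c ∈ cs, pvValid c) :
    cs.reverse.foldl stepB ((List.range 143).map (fun r => if r = 7 then (1 : Int) else 0))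
      = (List.range 143).map (fun r => (W cs r : Int) % 1000000007) := by
  induction cs with
  | nil =>
    rw [List.reverse_nil, List.foldl_nil]
    apply List.map_congr_left
    intro r _
    by_cases h : r = 7 <;> simp [W, h]
  | cons c cs ih =>
    have hvs : ∀ x ∈ cs, pvValid x := fun x hx => hv x (by simp [hx])
    rw [List.reverse_cons, List.foldl_append, ih hvs, List.foldl_cons, List.foldl_nil]
    by_cases hq : c = '?'
    · subst hq
      rw [stepB, if_pos rfl]
      apply List.map_congr_left
      intro r hr
      have inner : (List.range 10).map
            (fun d => ((List.range 143).map (fun r => (W cs r : Int) % 1000000007)).getD ((10 * r + d) % 143) 0)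
          = (List.range 10).map (fun d => (W cs ((10 * r + d) % 143) : Int) % 1000000007) := by
        apply List.map_congr_left
        intro d _
        exact getD_map_range' _ _ _ (Nat.mod_lt _ (by norm_num))
      rw [inner]
      have hmod : Int.ModEq 1000000007
          (((List.range 10).map (fun d => (W cs ((10 * r + d) % 143) : Int) % 1000000007)).sum)
          (((List.range 10).map (fun d => (W cs ((10 * r + d) % 143) : Int))).sum) :=
        list_sum_modeq _ _ _ (fun d _ => Int.mod_modEq _ _)
      rw [hmod]
      congr 1
      rw [show W ('?' :: cs) r = ((List.range 10).map (fun d => W cs ((r * 10 + d) % 143))).sum from by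
          simp [W, digitsOf],
        Nat.cast_list_sum, List.map_map]
      congr 1
      apply List.map_congr_left
      intro d _
      rw [Nat.mul_comm r 10]
      rfl
    · have hd : c.isDigit := (hv c (by simp)).resolve_left hq
      rw [stepB, if_neg hq]
      apply List.map_congr_left
      intro r hr
      rw [digit_indexB c hd r, Int.toNat_natCast,
        getD_map_range' _ _ _ (Nat.mod_lt _ (by norm_num))]
      rw [show W (c :: cs) r = W cs ((r * 10 + (c.toNat - 48)) % 143) from by
          simp [W, digitsOf, hq],
        Nat.mul_comm r 10]

-- ===== VERDICT (by name: the statement is the Claim_ definition above) =====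
set_option maxRecDepth 10000 in
set_option maxHeartbeats 1000000 in
theorem count_helpful_integers_spec : Claim_equal_count_helpful_integers := by
  intro s _ hpre
  unfold Spec_count_helpful_integers
  have hv : ∀ c ∈ s.toList, pvValid c := by
    rw [Pre_count_helpful_integers, List.all_eq_true] at hpre
    intro c hc
    simpa [pvValid] using hpre c hc
  -- B's value
  have hB : count_helpful_integers_alt s = (W s.toList 0 : Int) % 1000000007 := by
    rw [count_helpful_integers_alt]
    show (s.toList.reverse.foldl stepB _).getD 0 0 = _
    rw [B_inv s.toList hv, getD_map_range' _ _ _ (by norm_num)]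
  -- A's value
  have hA : count_helpful_integers s = (W s.toList 0 : Int) % 1000000007 % 1000000007 := by
    show (((List.range s.toList.length).foldl (stepA s.toList) (pvInit s.toList.length)).getD
        s.toList.length []).getD 7 0 % 1000000007
      = (W s.toList 0 : Int) % 1000000007 % 1000000007
    rw [(A_table s.toList s.toList.length le_rfl).2.1, List.take_length]
    have hrow0 : ∀ r, r < 143 →
        ((List.replicate 143 (0:Int)).set 0 1).getD r 0
          = (if r = 0 then (1:Int) else 0) % 1000000007 := by
      intro r hr
      by_cases h : r = 0
      · subst h
        rw [getD_set_self _ _ _ _ (by simp)]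
        norm_num
      · rw [getD_set_ne _ _ _ _ _ (fun hh => h hh.symm), getD_replicate' _ _ _ _ hr]
        simp [h]
    have h := A_main s.toList hv ((List.replicate 143 (0:Int)).set 0 1)
      (fun r => if r = 0 then 1 else 0)
      (by rw [List.length_set, List.length_replicate]) hrow0
    have hsum : LSum 143 (fun r => (if r = 0 then (1:Int) else 0) * (W s.toList r : Int))
        = (W s.toList 0 : Int) := by
      rw [LSum_eq]
      rw [Finset.sum_congr rfl (fun r _ => by
        by_cases h : r = 0 <;> simp [h] : ∀ r ∈ Finset.range 143,
          (if r = 0 then (1:Int) else 0) * ((W s.toList r : Nat) : Int)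
            = if r = 0 then ((W s.toList r : Nat) : Int) else 0)]
      simp
    calc (prefRow s.toList).getD 7 0 % 1000000007
        = LSum 143 (fun r => (if r = 0 then (1:Int) else 0) * (W s.toList r : Int))
            % 1000000007 % 1000000007 := congrArg (· % 1000000007) h
      _ = (W s.toList 0 : Int) % 1000000007 % 1000000007 := by rw [hsum]
  rw [hA, hB, emod_emod_self]
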